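-- pv_equiv track=rewrite | github.com/HamzaZ4/ECSE211FinalProject | WorkingCodeForDemo.py.py | find_exact_blue
-- ===== SOURCE A (Python) =====
-- def find_exact_blue(blue_intervals):
--     real_blue_intervals = []
--     if not blue_intervals:
--         return []
--     interval = blue_intervals
--     if not interval:
--         return []
--     if len(interval) == 1:
--         return interval
--     cur_start, cur_end = interval[0]
--     for i in range(len(interval) - 1):
--         next_start, next_end = interval[i + 1]
--
--         if abs(cur_end - next_start) < 20:
--             cur_end = next_end
--         else:
--             real_blue_intervals.append((cur_start, cur_end))
--             cur_start = next_start
--             cur_end = next_end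
--     real_blue_intervals.append((cur_start, cur_end))
--     return real_blue_intervals
-- ===== SOURCE B (Python) =====
-- def find_exact_blue(blue_intervals):
--     # Staged computation: (1) find the cut positions between adjacent raw
--     # intervals whose gap is >= 20, (2) slice the list at those cuts and
--     # summarize each run by (first start, last end).  Correct because the
--     # original loop always sets cur_end to the raw next_end, so whether a
--     # break happens between positions i and i+1 depends only on the raw
--     # pair (blue_intervals[i][1], blue_intervals[i+1][0]).
--     if not blue_intervals:
--         return []
--     cuts = [i + 1 for i in range(len(blue_intervals) - 1)
--             if abs(blue_intervals[i][1] - blue_intervals[i + 1][0]) >= 20]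
--     bounds = [0] + cuts + [len(blue_intervals)]
--     return [(blue_intervals[b][0], blue_intervals[e - 1][1])
--             for b, e in zip(bounds, bounds[1:])]
-- ===== Notes on version B (the rewrite author's own statement) =====
-- stated objective: alternative
-- what changed: Replaces A's single stateful scan with cur_start/cur_end scalars by two staged passes: first compute the list of cut indices where the gap between adjacent raw intervals is >= 20, then slice the list at those bounds and summarize each run as (first start, last end); correct because A always resets cur_end to the raw next_end, so breaks depend only on adjacent raw pairs.
import Mathlib
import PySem

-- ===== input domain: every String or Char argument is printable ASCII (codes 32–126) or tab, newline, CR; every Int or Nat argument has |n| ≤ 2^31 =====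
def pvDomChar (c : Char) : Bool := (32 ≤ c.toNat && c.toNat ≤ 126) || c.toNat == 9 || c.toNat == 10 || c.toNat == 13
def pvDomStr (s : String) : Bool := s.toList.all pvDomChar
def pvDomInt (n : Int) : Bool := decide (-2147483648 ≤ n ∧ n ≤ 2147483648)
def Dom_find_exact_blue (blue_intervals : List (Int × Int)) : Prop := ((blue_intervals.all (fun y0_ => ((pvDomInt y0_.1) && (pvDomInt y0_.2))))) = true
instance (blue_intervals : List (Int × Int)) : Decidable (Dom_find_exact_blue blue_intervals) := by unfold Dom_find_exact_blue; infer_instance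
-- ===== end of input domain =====

-- B replaces A's single stateful scan (cur_start/cur_end updated in a loop) by two
-- staged passes: compute the cut indices where adjacent raw intervals are ≥ 20 apart,
-- then slice the list at those bounds and summarize each run: an alternative decomposition.

-- ===== PORT A =====
-- A's loop 'for i in range(len(interval)-1): next = interval[i+1]' visits exactly the
-- tail elements in order, so it is ported as a fold over the tail with the same state
-- (real_blue_intervals, cur_start, cur_end).
def find_exact_blue (blue_intervals : List (Int × Int)) : List (Int × Int) :=
  if blue_intervals = [] then []
  else if blue_intervals.length = 1 then blue_intervals
  else
    match blue_intervals with
    | [] => []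
    | (cs, ce) :: rest =>
      let st := rest.foldl
        (fun (s : List (Int × Int) × Int × Int) (nxt : Int × Int) =>
          if (s.2.2 - nxt.1).natAbs < 20 then (s.1, s.2.1, nxt.2)
          else (s.1 ++ [(s.2.1, s.2.2)], nxt.1, nxt.2))
        ([], cs, ce)
      st.1 ++ [(st.2.1, st.2.2)]

-- ===== PORT B =====
-- Source B's first comprehension: the cut positions i+1 where |bi[i].end - bi[i+1].start| ≥ 20.
-- All indices used by Source B are in range, so List.getD is exact there.
def pvCuts (bi : List (Int × Int)) : List Nat :=
  ((List.range (bi.length - 1)).filter (fun i =>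
      20 ≤ ((bi.getD i (0, 0)).2 - (bi.getD (i + 1) (0, 0)).1).natAbs)).map (· + 1)

def find_exact_blue_alt (blue_intervals : List (Int × Int)) : List (Int × Int) :=
  if blue_intervals = [] then []
  else
    let bounds : List Nat := 0 :: (pvCuts blue_intervals ++ [blue_intervals.length])
    (bounds.zip bounds.tail).map (fun be =>
      ((blue_intervals.getD be.1 (0, 0)).1, (blue_intervals.getD (be.2 - 1) (0, 0)).2))

-- ===== PRECONDITION & SPEC =====
def Spec_find_exact_blue (blue_intervals : List (Int × Int)) (out : List (Int × Int)) : Prop := out = find_exact_blue_alt blue_intervals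
instance (blue_intervals : List (Int × Int)) (out : List (Int × Int)) : Decidable (Spec_find_exact_blue blue_intervals out) := by unfold Spec_find_exact_blue; infer_instance

-- ===== CLAIM (what is proved, stated in full; the proofs are below) =====
def Claim_equal_find_exact_blue : Prop := ∀ (blue_intervals : List (Int × Int)), Dom_find_exact_blue blue_intervals → Spec_find_exact_blue blue_intervals (find_exact_blue blue_intervals)

-- ===== LEMMAS AND PROOFS =====

-- Canonical recursive description of the merge both programs compute.
def pvMrg : Int → Int → List (Int × Int) → List (Int × Int)
  | cs, ce, [] => [(cs, ce)]
  | cs, ce, n :: tl =>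
      if (ce - n.1).natAbs < 20 then pvMrg cs n.2 tl
      else (cs, ce) :: pvMrg n.1 n.2 tl

-- A's fold with state (real, cs, ce) computes real ++ pvMrg cs ce rest.
theorem pv_foldA (rest : List (Int × Int)) :
    ∀ (real : List (Int × Int)) (cs ce : Int),
    (fun st => st.1 ++ [(st.2.1, st.2.2)])
      (rest.foldl
        (fun (s : List (Int × Int) × Int × Int) (nxt : Int × Int) =>
          if (s.2.2 - nxt.1).natAbs < 20 then (s.1, s.2.1, nxt.2)
          else (s.1 ++ [(s.2.1, s.2.2)], nxt.1, nxt.2))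
        (real, cs, ce)) = real ++ pvMrg cs ce rest := by
  induction rest with
  | nil => intro real cs ce; simp [pvMrg]
  | cons p tl ih =>
    intro real cs ce
    by_cases h : (ce - p.1).natAbs < 20
    · simpa [pvMrg, h] using ih real cs p.2
    · simpa [pvMrg, h, List.append_assoc] using ih (real ++ [(cs, ce)]) p.1 p.2

-- pvMrg's result is (cs, e) :: t where e and t do not depend on cs.
theorem pv_mrg_shape (l : List (Int × Int)) :
    ∀ (ce : Int), ∃ e t, ∀ cs, pvMrg cs ce l = (cs, e) :: t := by
  induction l with
  | nil => intro ce; exact ⟨ce, [], fun cs => rfl⟩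
  | cons n tl ih =>
    intro ce
    by_cases h : (ce - n.1).natAbs < 20
    · obtain ⟨e, t, ht⟩ := ih n.2
      exact ⟨e, t, fun cs => by simp [pvMrg, h, ht]⟩
    · exact ⟨ce, pvMrg n.1 n.2 tl, fun cs => by simp [pvMrg, h]⟩

-- cut positions are ≥ 1, and so is the final bound.
theorem pv_bounds_pos (l : List (Int × Int)) (k : Nat) :
    ∀ e ∈ pvCuts l ++ [k + 1], 1 ≤ e := by
  intro e he
  rcases List.mem_append.1 he with h | h
  · unfold pvCuts at h
    rcases List.mem_map.1 h with ⟨i, _, rfl⟩; omega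
  · simp at h; omega

-- shifting all bounds by one shifts the summarized pairs accordingly.
theorem pv_zip_shift {α : Type} (g h : Nat × Nat → α) (m : List Nat)
    (hm : ∀ b e, (b, e) ∈ m.zip m.tail → g (b + 1, e + 1) = h (b, e)) :
    ((m.map (· + 1)).zip (m.map (· + 1)).tail).map g = (m.zip m.tail).map h := by
  have : (m.map (· + 1)).tail = m.tail.map (· + 1) := by
    cases m <;> simp
  rw [this, List.zip_map, List.map_map]
  exact List.map_congr_left (fun p hp => by
    cases p with
    | mk b e => simpa using hm b e hp)

-- cut positions of x :: y :: tl in terms of those of y :: tl.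
theorem pv_cuts_cons (x y : Int × Int) (tl : List (Int × Int)) :
    pvCuts (x :: y :: tl) =
      (if 20 ≤ (x.2 - y.1).natAbs then [1] else []) ++ (pvCuts (y :: tl)).map (· + 1) := by
  unfold pvCuts
  have hlen : (x :: y :: tl).length - 1 = tl.length + 1 := by simp
  rw [hlen, List.range_succ_eq_map]
  have hlen2 : (y :: tl).length - 1 = tl.length := by simp
  rw [hlen2]
  simp only [List.filter_cons, List.filter_map, List.map_map]
  have hf : List.filter ((fun i => decide (20 ≤ (((x :: y :: tl).getD i ((0 : Int), (0 : Int))).2 - ((x :: y :: tl).getD (i + 1) ((0 : Int), (0 : Int))).1).natAbs)) ∘ Nat.succ) (List.range tl.length)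
      = List.filter (fun i => decide (20 ≤ (((y :: tl).getD i ((0 : Int), (0 : Int))).2 - ((y :: tl).getD (i + 1) ((0 : Int), (0 : Int))).1).natAbs)) (List.range tl.length) :=
    List.filter_congr (fun i _ => by simp [Function.comp])
  rw [hf]
  by_cases h : 20 ≤ (x.2 - y.1).natAbs
  · rw [if_pos (by simpa using h), if_pos h]
    simp [Function.comp]
  · rw [if_neg (by simpa using h), if_neg h]
    simp [Function.comp]

-- B's recurrence on two leading elements.
theorem pv_B_rec (x y : Int × Int) (tl : List (Int × Int)) :
    find_exact_blue_alt (x :: y :: tl) =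
      if (x.2 - y.1).natAbs < 20 then
        match find_exact_blue_alt (y :: tl) with
        | [] => []
        | (_, e) :: t => (x.1, e) :: t
      else x :: find_exact_blue_alt (y :: tl) := by
  have hL : ∀ e ∈ pvCuts (y :: tl) ++ [tl.length + 1], 1 ≤ e := pv_bounds_pos (y :: tl) tl.length
  have hshift : ∀ (m : List Nat), (∀ e ∈ m.tail, 1 ≤ e) →
      ((m.map (· + 1)).zip (m.map (· + 1)).tail).map (fun be =>
         (((x :: y :: tl).getD be.1 ((0 : Int), (0 : Int))).1,
          ((x :: y :: tl).getD (be.2 - 1) ((0 : Int), (0 : Int))).2))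
      = (m.zip m.tail).map (fun be =>
         (((y :: tl).getD be.1 ((0 : Int), (0 : Int))).1,
          ((y :: tl).getD (be.2 - 1) ((0 : Int), (0 : Int))).2)) := by
    intro m hm
    refine pv_zip_shift _ _ m (fun b e hbe => ?_)
    have he : 1 ≤ e := hm e (List.of_mem_zip hbe).2
    obtain ⟨k, rfl⟩ : ∃ k, e = k + 1 := ⟨e - 1, by omega⟩
    simp
  cases hC : pvCuts (y :: tl) ++ [tl.length + 1] with
  | nil => exact absurd hC (by simp)
  | cons l0 lt =>
    have hl0 : 1 ≤ l0 := hL l0 (hC ▸ List.mem_cons_self)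
    have hlt : ∀ e ∈ lt, 1 ≤ e := fun e he => hL e (hC ▸ List.mem_cons_of_mem _ he)
    have hmap : (pvCuts (y :: tl)).map (· + 1) ++ [tl.length + 1 + 1] =
        (l0 + 1) :: lt.map (· + 1) := by
      have h1 : (pvCuts (y :: tl)).map (· + 1) ++ [tl.length + 1 + 1] =
          (pvCuts (y :: tl) ++ [tl.length + 1]).map (· + 1) := by simp
      rw [h1, hC]; simp
    obtain ⟨k, rfl⟩ : ∃ k, l0 = k + 1 := ⟨l0 - 1, by omega⟩
    unfold find_exact_blue_alt
    rw [if_neg (by simp)]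
    simp only [List.length_cons]
    rw [pv_cuts_cons]
    by_cases h : (x.2 - y.1).natAbs < 20
    · rw [if_neg (by omega), if_pos h]
      simp only [List.nil_append, hmap]
      have hz := hshift ((k + 1) :: lt) (fun e he => hlt e (by simpa using he))
      simp only [List.map_cons, List.tail_cons, List.getD_eq_getElem?_getD] at hz
      rw [if_neg (show ¬(y :: tl = ([] : List (Int × Int))) by simp), hC]
      simp only [List.tail_cons, List.zip_cons_cons, List.map_cons]
      simp [hz]
    · rw [if_pos (by omega), if_neg h]
      simp only [List.cons_append, List.nil_append, hmap]
      have hz := hshift ((k + 1) :: lt) (fun e he => hlt e (by simpa using he))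
      simp only [List.map_cons, List.tail_cons, List.getD_eq_getElem?_getD] at hz
      rw [if_neg (show ¬(y :: tl = ([] : List (Int × Int))) by simp), hC]
      simp only [List.tail_cons, List.zip_cons_cons, List.map_cons]
      simp [hz]

-- B computes pvMrg on a nonempty list.
theorem pv_B_mrg (l : List (Int × Int)) :
    ∀ x : Int × Int, find_exact_blue_alt (x :: l) = pvMrg x.1 x.2 l := by
  induction l with
  | nil =>
    intro x
    simp [find_exact_blue_alt, pvCuts, pvMrg]
  | cons y tl ih =>
    intro x
    rw [pv_B_rec, ih y]
    by_cases h : (x.2 - y.1).natAbs < 20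
    · obtain ⟨e, t, ht⟩ := pv_mrg_shape tl y.2
      simp [pvMrg, h, ht]
    · simp [pvMrg, h]

-- ===== VERDICT (by name: the statement is the Claim_ definition above) =====
theorem find_exact_blue_spec : Claim_equal_find_exact_blue := by
  intro bi _
  unfold Spec_find_exact_blue
  match bi with
  | [] => rfl
  | [x] => simp [find_exact_blue, find_exact_blue_alt, pvCuts]
  | x :: y :: tl =>
    rw [pv_B_mrg (y :: tl) x]
    show (if (x :: y :: tl : List (Int × Int)) = [] then [] else _) = _
    rw [if_neg (by simp), if_neg (by simp)]
    exact pv_foldA (y :: tl) [] x.1 x.2
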